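-- pv_equiv track=rewrite | github.com/liqiming-whu/pybiotk | src/pybiotk/utils/utils.py | cigartuples2blocks
-- ===== SOURCE A (Python) =====
-- from typing import List, Dict, Sequence, Tuple, Literal, Iterator, Iterable, Optional, Callable, Union, TextIO
--
-- def cigartuples2blocks(start: int, cigartuples: Sequence[Tuple[int, int]], shift: int = 0) -> List[Tuple[int, int]]:
--     tmp_abs_start = shift + start
--     blocks = []
--     for cigar, length in cigartuples:
--         if cigar in [0, 2]:
--             blocks.append((tmp_abs_start, tmp_abs_start + length))
--             tmp_abs_start += length
--         elif cigar in [3, 6, 10]: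
--             tmp_abs_start += length
--     merged_blocks = []
--     tmp_start = None
--     block_num = len(blocks)
--     for i in range(block_num):
--         if tmp_start is None:
--             tmp_start = blocks[i][0]
--         if not ((i < block_num - 1) and (blocks[i + 1][0] <= blocks[i][1])):
--             merged_blocks.append((tmp_start, blocks[i][1]))
--             tmp_start = None
--     return merged_blocks
-- ===== SOURCE B (Python) =====
-- def cigartuples2blocks(start, cigartuples, shift=0):
--     # single streaming pass: no intermediate per-op block list
--     pos = shift + start
--     merged = []
--     cur = None  # open block as (start, end)
--     for cigar, length in cigartuples:
--         if cigar in (0, 2):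
--             if cur is not None and pos <= cur[1]:
--                 cur = (cur[0], pos + length)
--             else:
--                 if cur is not None:
--                     merged.append(cur)
--                 cur = (pos, pos + length)
--             pos += length
--         elif cigar in (3, 6, 10):
--             pos += length
--     if cur is not None:
--         merged.append(cur)
--     return merged
-- ===== Notes on version B (the rewrite author's own statement) =====
-- stated objective: alternative
-- what changed: Replaces A's two-phase design (build a per-op block list, then merge it with an indexed lookahead loop) by one streaming pass that keeps a single open block and emits it when the next block does not touch it.
import Mathlib
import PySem

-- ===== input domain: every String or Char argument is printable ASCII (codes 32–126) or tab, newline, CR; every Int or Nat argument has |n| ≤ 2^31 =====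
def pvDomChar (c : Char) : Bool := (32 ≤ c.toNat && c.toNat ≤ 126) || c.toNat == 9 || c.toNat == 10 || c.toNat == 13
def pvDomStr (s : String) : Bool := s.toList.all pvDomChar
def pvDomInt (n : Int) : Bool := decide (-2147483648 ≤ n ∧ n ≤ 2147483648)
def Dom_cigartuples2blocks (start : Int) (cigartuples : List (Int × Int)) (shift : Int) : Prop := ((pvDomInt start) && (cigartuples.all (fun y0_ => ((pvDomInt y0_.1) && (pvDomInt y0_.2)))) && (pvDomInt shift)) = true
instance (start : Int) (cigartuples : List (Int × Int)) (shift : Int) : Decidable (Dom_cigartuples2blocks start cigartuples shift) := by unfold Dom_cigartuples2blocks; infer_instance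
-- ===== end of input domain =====

-- B replaces A's two-phase (block list, then indexed merge loop) by one streaming pass
-- with a single open block; same return value on every input (objective: alternative).


-- ===== PORT A =====
-- step of A's first loop: state (blocks, tmp_abs_start)
def pvAStep1 (st : List (Int × Int) × Int) (cl : Int × Int) : List (Int × Int) × Int :=
  if cl.1 = 0 ∨ cl.1 = 2 then (st.1 ++ [(st.2, st.2 + cl.2)], st.2 + cl.2)
  else if cl.1 = 3 ∨ cl.1 = 6 ∨ cl.1 = 10 then (st.1, st.2 + cl.2)
  else st

-- step of A's second loop over `range(block_num)`: state (merged_blocks, tmp_start)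
-- blocks[i] is always in range in A, so pyGetD's default (0,0) is never used
def pvAStep2 (blocks : List (Int × Int)) (st : List (Int × Int) × Option Int) (i : Int) :
    List (Int × Int) × Option Int :=
  let ts := st.2.getD (PySem.List.pyGetD blocks i (0, 0)).1
  if i < (blocks.length : Int) - 1 ∧
      (PySem.List.pyGetD blocks (i + 1) (0, 0)).1 ≤ (PySem.List.pyGetD blocks i (0, 0)).2 then
    (st.1, some ts)
  else
    (st.1 ++ [(ts, (PySem.List.pyGetD blocks i (0, 0)).2)], none)

def cigartuples2blocks (start : Int) (cigartuples : List (Int × Int)) (shift : Int) : List (Int × Int) :=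
  let blocks := (cigartuples.foldl pvAStep1 ([], shift + start)).1
  (((PySem.List.pyRange 0 (blocks.length : Int) 1).foldl (pvAStep2 blocks) ([], none))).1

-- ===== PORT B =====
-- step of B's single streaming loop: state (merged, cur open block, pos)
def pvBStep (st : List (Int × Int) × Option (Int × Int) × Int) (cl : Int × Int) :
    List (Int × Int) × Option (Int × Int) × Int :=
  if cl.1 = 0 ∨ cl.1 = 2 then
    match st.2.1 with
    | some c =>
        if st.2.2 ≤ c.2 then (st.1, some (c.1, st.2.2 + cl.2), st.2.2 + cl.2)
        else (st.1 ++ [c], some (st.2.2, st.2.2 + cl.2), st.2.2 + cl.2)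
    | none => (st.1, some (st.2.2, st.2.2 + cl.2), st.2.2 + cl.2)
  else if cl.1 = 3 ∨ cl.1 = 6 ∨ cl.1 = 10 then (st.1, st.2.1, st.2.2 + cl.2)
  else st

def cigartuples2blocks_alt (start : Int) (cigartuples : List (Int × Int)) (shift : Int) : List (Int × Int) :=
  let st := cigartuples.foldl pvBStep ([], none, shift + start)
  match st.2.1 with
  | some c => st.1 ++ [c]
  | none => st.1

-- ===== PRECONDITION & SPEC =====
def Spec_cigartuples2blocks (start : Int) (cigartuples : List (Int × Int)) (shift : Int) (out : List (Int × Int)) : Prop := out = cigartuples2blocks_alt start cigartuples shift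
instance (start : Int) (cigartuples : List (Int × Int)) (shift : Int) (out : List (Int × Int)) : Decidable (Spec_cigartuples2blocks start cigartuples shift out) := by unfold Spec_cigartuples2blocks; infer_instance

-- ===== CLAIM (what is proved, stated in full; the proofs are below) =====
def Claim_equal_cigartuples2blocks : Prop := ∀ (start : Int) (cigartuples : List (Int × Int)) (shift : Int), Dom_cigartuples2blocks start cigartuples shift → Spec_cigartuples2blocks start cigartuples shift (cigartuples2blocks start cigartuples shift)

-- ===== LEMMAS AND PROOFS =====

-- structural version of A's first loop
def pvMkBlocks (pos : Int) : List (Int × Int) → List (Int × Int)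
  | [] => []
  | (c, l) :: r =>
      if c = 0 ∨ c = 2 then (pos, pos + l) :: pvMkBlocks (pos + l) r
      else if c = 3 ∨ c = 6 ∨ c = 10 then pvMkBlocks (pos + l) r
      else pvMkBlocks pos r

-- structural version of A's merge loop (lookahead, state = tmp_start)
def pvMergeA : Option Int → List (Int × Int) → List (Int × Int)
  | _, [] => []
  | ts, [(bs, be)] => [(ts.getD bs, be)]
  | ts, (bs, be) :: (ns, ne) :: r =>
      let t := ts.getD bs
      if ns ≤ be then pvMergeA (some t) ((ns, ne) :: r)
      else (t, be) :: pvMergeA none ((ns, ne) :: r)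

-- structural version of B's merge behaviour (lookbehind, state = open block)
def pvMergeB (cur : Option (Int × Int)) : List (Int × Int) → List (Int × Int)
  | [] => match cur with | some c => [c] | none => []
  | (bs, be) :: r =>
      match cur with
      | none => pvMergeB (some (bs, be)) r
      | some (s, e) => if bs ≤ e then pvMergeB (some (s, be)) r
                       else (s, e) :: pvMergeB (some (bs, be)) r

theorem pvAStep1_eq (acc : List (Int × Int)) (pos : Int) (ct : List (Int × Int)) :
    (ct.foldl pvAStep1 (acc, pos)).1 = acc ++ pvMkBlocks pos ct := by
  induction ct generalizing acc pos with
  | nil => simp [pvMkBlocks]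
  | cons cl r ih =>
      obtain ⟨c, l⟩ := cl
      simp only [List.foldl_cons, pvAStep1, pvMkBlocks]
      split_ifs <;> simp [ih]

theorem pvMergeA_none_cons (bs be : Int) (r : List (Int × Int)) :
    pvMergeA none ((bs, be) :: r) = pvMergeA (some bs) ((bs, be) :: r) := by
  cases r with
  | nil => simp [pvMergeA]
  | cons q r' => obtain ⟨ns, ne⟩ := q; simp [pvMergeA]

theorem pvMergeA_some (r : List (Int × Int)) (t bs be : Int) :
    pvMergeA (some t) ((bs, be) :: r) = pvMergeB (some (t, be)) r := by
  induction r generalizing t bs be with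
  | nil => simp [pvMergeA, pvMergeB]
  | cons q r' ih =>
      obtain ⟨ns, ne⟩ := q
      simp only [pvMergeA, pvMergeB, Option.getD_some]
      split_ifs with h
      · exact ih t ns ne
      · rw [pvMergeA_none_cons, ih ns ns ne]

theorem pvMergeA_none (bl : List (Int × Int)) :
    pvMergeA none bl = pvMergeB none bl := by
  cases bl with
  | nil => rfl
  | cons p r =>
      obtain ⟨bs, be⟩ := p
      rw [pvMergeA_none_cons, pvMergeA_some]
      rfl

-- A's range-fold merge equals pvMergeA on the suffix
theorem pvAStep2_eq (blocks : List (Int × Int)) (suf : List (Int × Int)) (k : Nat)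
    (hk : blocks.drop k = suf) (acc : List (Int × Int)) (ts : Option Int) :
    ((PySem.List.pyRange (k : Int) (blocks.length : Int) 1).foldl (pvAStep2 blocks) (acc, ts)).1
      = acc ++ pvMergeA ts suf := by
  induction suf generalizing k acc ts with
  | nil =>
      have hle : blocks.length ≤ k := by
        rcases Nat.lt_or_ge k blocks.length with h | h
        · have := List.drop_eq_getElem_cons h
          rw [hk] at this
          simp at this
          omega
        · exact h
      rw [show PySem.List.pyRange (k : Int) (blocks.length : Int) 1 = [] from by
        simp [PySem.List.pyRange]; omega]
      simp [pvMergeA]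
  | cons p r ih =>
      obtain ⟨bs, be⟩ := p
      have hlt : k < blocks.length := by
        rcases Nat.lt_or_ge k blocks.length with h | h
        · exact h
        · rw [List.drop_eq_nil_of_le h] at hk
          simp at hk
      have hcons := List.drop_eq_getElem_cons hlt
      rw [hk] at hcons
      simp only [List.cons.injEq] at hcons
      have hget : blocks[k] = (bs, be) := hcons.1.symm
      have hdropr : blocks.drop (k + 1) = r := hcons.2.symm
      have hgd : PySem.List.pyGetD blocks (k : Int) (0, 0) = (bs, be) := by
        rw [PySem.List.pyGetD_natCast]
        simp [List.getD, hlt, hget]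
      rw [PySem.List.pyRange_one_cons (by exact_mod_cast hlt)]
      cases r with
      | nil =>
          have hlen : blocks.length = k + 1 := by
            have := congrArg List.length hdropr
            simp at this
            omega
          simp only [List.foldl_cons, pvAStep2, hgd]
          split_ifs with hc
          · exfalso
            have hc1 := hc.1
            omega
          · have H := ih (k + 1) hdropr (acc ++ [(ts.getD bs, be)]) none
            push_cast at H ⊢
            rw [H]
            simp [pvMergeA]
      | cons q r' =>
          obtain ⟨ns, ne⟩ := q
          have hlt1 : k + 1 < blocks.length := by
            have := congrArg List.length hdropr
            simp at this
            omega
          have hcons1 := List.drop_eq_getElem_cons hlt1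
          rw [hdropr] at hcons1
          simp only [List.cons.injEq] at hcons1
          have hget1 : blocks[k + 1] = (ns, ne) := hcons1.1.symm
          have hgd1 : PySem.List.pyGetD blocks ((k : Int) + 1) (0, 0) = (ns, ne) := by
            rw [show ((k : Int) + 1) = ((k + 1 : Nat) : Int) from by push_cast; ring,
              PySem.List.pyGetD_natCast]
            simp [List.getD, hlt1, hget1]
          simp only [List.foldl_cons, pvAStep2, hgd, hgd1]
          split_ifs with hc
          · have H := ih (k + 1) hdropr acc (some (ts.getD bs))
            push_cast at H ⊢
            rw [H]
            simp [pvMergeA, hc.2]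
          · have hns : ¬ ns ≤ be := by
              intro h
              exact hc ⟨by omega, h⟩
            have H := ih (k + 1) hdropr (acc ++ [(ts.getD bs, be)]) none
            push_cast at H ⊢
            rw [H]
            simp [pvMergeA, pvMergeA_none_cons, hns]

-- B's fused loop equals pvMergeB over the block stream
theorem pvBStep_eq (ct : List (Int × Int)) (acc : List (Int × Int))
    (cur : Option (Int × Int)) (pos : Int) :
    (match (ct.foldl pvBStep (acc, cur, pos)).2.1 with
      | some c => (ct.foldl pvBStep (acc, cur, pos)).1 ++ [c]
      | none => (ct.foldl pvBStep (acc, cur, pos)).1)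
      = acc ++ pvMergeB cur (pvMkBlocks pos ct) := by
  induction ct generalizing acc cur pos with
  | nil => cases cur <;> simp [pvMergeB, pvMkBlocks]
  | cons cl r ih =>
      obtain ⟨c, l⟩ := cl
      simp only [List.foldl_cons, pvBStep, pvMkBlocks]
      split_ifs with h1 h2
      · cases cur with
        | none => simp only [ih]; simp [pvMergeB]
        | some p =>
            obtain ⟨s, e⟩ := p
            by_cases hp : pos ≤ e
            · simp only [hp, ih]; simp [pvMergeB, hp]
            · simp only [if_neg hp, ih]; simp [pvMergeB, hp]
      · simp [ih]
      · simp [ih]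

theorem cigartuples2blocks_eq_alt (start : Int) (ct : List (Int × Int)) (shift : Int) :
    cigartuples2blocks start ct shift = cigartuples2blocks_alt start ct shift := by
  unfold cigartuples2blocks cigartuples2blocks_alt
  rw [show ((ct.foldl pvAStep1 ([], shift + start)).1) = pvMkBlocks (shift + start) ct from by
    simpa using pvAStep1_eq [] (shift + start) ct]
  have h2 := pvAStep2_eq (pvMkBlocks (shift + start) ct) (pvMkBlocks (shift + start) ct) 0 rfl [] none
  norm_num at h2
  rw [h2]
  have h3 := pvBStep_eq ct [] none (shift + start)
  simp only [List.nil_append] at h3 ⊢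
  rw [pvMergeA_none, ← h3]

-- ===== VERDICT (by name: the statement is the Claim_ definition above) =====
theorem cigartuples2blocks_spec : Claim_equal_cigartuples2blocks := by
  intro start ct shift _
  unfold Spec_cigartuples2blocks
  exact cigartuples2blocks_eq_alt start ct shift
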